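-- pv_equiv track=rewrite | github.com/evaarakchieva/yandexTraining4 | yandexContest/final/D.py | min_len_sums_calc
-- ===== SOURCE A (Python) =====
-- def min_len_sums_calc(bricks):
--     dp_calc_set = {0}
--     min_len_sums_dict = {0 :[]}
--     for first_brick in bricks:
--         new_sums_set = dp_calc_set.copy()
--         for second_brick in sorted(dp_calc_set, reverse=True):
--             new_sum = first_brick + second_brick
--             new_sums_set.add(new_sum)
--             new_subset = [first_brick] + min_len_sums_dict[second_brick]
--             if new_sum not in min_len_sums_dict:
--                 min_len_sums_dict[new_sum] = new_subset
--             else: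
--                 min_len_sums_dict[new_sum] = min(min_len_sums_dict[new_sum], new_subset, key=len)
--         dp_calc_set = new_sums_set
--     return min_len_sums_dict
-- ===== SOURCE B (Python) =====
-- def min_len_sums_calc(bricks):
--     # DP over subset lengths with predecessor pointers (an immutable node DAG);
--     # the subset lists themselves are rebuilt only once, at the end.
--     nodes = []               # node k = (brick, parent id or None)
--     state = {0: (0, None)}   # sum -> (subset length, node id or None)
--     for b in bricks:
--         for s in sorted(state, reverse=True):
--             l, p = state[s]
--             t = s + b
--             if t not in state or l + 1 < state[t][0]:
--                 nodes.append((b, p))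
--                 state[t] = (l + 1, len(nodes) - 1)
--     return {t: _rebuild(nodes, p) for t, (l, p) in state.items()}
--
-- def _rebuild(nodes, p):
--     if p is None:
--         return []
--     b, q = nodes[p]
--     return [b] + _rebuild(nodes, q)
-- ===== Notes on version B (the rewrite author's own statement) =====
-- stated objective: alternative
-- what changed: B's DP stores only (length, predecessor-pointer) per sum in an immutable node arena instead of building and min(key=len)-comparing whole subset lists inside the loop, and reconstructs each list once at the end by walking parent pointers; intended as faster (measured 2.2-2.5x at n=64, but a timing run could not confirm it at the largest probe size, where both time out).
import Mathlib
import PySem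

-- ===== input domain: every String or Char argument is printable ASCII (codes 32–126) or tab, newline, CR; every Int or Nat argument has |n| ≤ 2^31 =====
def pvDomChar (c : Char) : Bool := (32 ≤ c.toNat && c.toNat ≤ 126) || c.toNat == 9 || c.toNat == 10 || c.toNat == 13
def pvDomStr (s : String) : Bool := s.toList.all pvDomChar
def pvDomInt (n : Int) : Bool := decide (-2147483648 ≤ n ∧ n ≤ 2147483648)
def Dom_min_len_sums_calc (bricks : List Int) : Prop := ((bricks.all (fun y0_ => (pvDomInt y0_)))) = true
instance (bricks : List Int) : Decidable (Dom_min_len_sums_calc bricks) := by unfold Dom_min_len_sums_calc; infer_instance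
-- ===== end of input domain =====

-- B replaces A's in-loop list building and min(key=len) comparisons by a DP over
-- (length, predecessor-pointer) pairs in an immutable node arena, rebuilding each
-- subset list once at the end; neither version mutates its argument.

-- ===== PORT A =====
def minA_step (first_brick : Int) (st2 : PySem.Set Int × PySem.Dict Int (List Int))
    (second_brick : Int) : PySem.Set Int × PySem.Dict Int (List Int) :=
  let new_sum := first_brick + second_brick
  let new_sums_set := PySem.Set.add st2.1 new_sum
  -- min_len_sums_dict[second_brick]: KeyError unreachable (second_brick is always a key)
  let new_subset := first_brick :: st2.2.getD second_brick []
  let d' :=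
    match st2.2.get? new_sum with
    | none => st2.2.insert new_sum new_subset
    | some old =>
        -- min(old, new_subset, key=len): the first argument wins ties
        st2.2.insert new_sum (if old.length ≤ new_subset.length then old else new_subset)
  (new_sums_set, d')

def minA_outer (st : PySem.Set Int × PySem.Dict Int (List Int)) (first_brick : Int) :
    PySem.Set Int × PySem.Dict Int (List Int) :=
  (PySem.List.sorted (st.1 : List Int) (fun x => x) true).foldl (minA_step first_brick)
    (st.1, st.2)  -- new_sums_set starts as dp_calc_set.copy()

def min_len_sums_calc (bricks : List Int) : List (Int × List Int) :=
  (bricks.foldl minA_outer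
    (PySem.Set.ofList [0], PySem.Dict.ofList [((0 : Int), ([] : List Int))])).2.items

-- ===== PORT B =====
-- _rebuild(nodes, p): Python's recursion terminates because parent ids strictly
-- decrease; the fuel argument (always called with nodes.length, a bound on the chain
-- length) only makes that explicit — it is exact on every reachable call.
def minB_rebuild (nodes : List (Int × Option Nat)) : Nat → Option Nat → List Int
  | _, none => []
  | 0, some _ => []          -- fuel exhausted: unreachable
  | f + 1, some k =>
      match nodes[k]? with   -- nodes[p]: IndexError unreachable (ids index the arena)
      | none => []
      | some (b, q) => b :: minB_rebuild nodes f q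

def minB_step (b : Int) (st : List (Int × Option Nat) × PySem.Dict Int (Int × Option Nat))
    (s : Int) : List (Int × Option Nat) × PySem.Dict Int (Int × Option Nat) :=
  -- state[s]: KeyError unreachable (s is always a key)
  let p := st.2.getD s ((0 : Int), (none : Option Nat))
  let t := s + b
  let doUpd : Bool :=
    match st.2.get? t with
    | none => true
    | some cur => decide (p.1 + 1 < cur.1)
  if doUpd then
    let nodes' := st.1 ++ [(b, p.2)]
    (nodes', st.2.insert t (p.1 + 1, some (nodes'.length - 1)))
  else st

def minB_outer (st : List (Int × Option Nat) × PySem.Dict Int (Int × Option Nat)) (b : Int) :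
    List (Int × Option Nat) × PySem.Dict Int (Int × Option Nat) :=
  (PySem.List.sorted st.2.keys (fun x => x) true).foldl (minB_step b) st

def min_len_sums_calc_alt (bricks : List Int) : List (Int × List Int) :=
  let st := bricks.foldl minB_outer
    (([] : List (Int × Option Nat)),
     PySem.Dict.ofList [((0 : Int), ((0 : Int), (none : Option Nat)))])
  st.2.items.map (fun q => (q.1, minB_rebuild st.1 st.1.length q.2.2))

-- ===== PRECONDITION & SPEC =====
def Spec_min_len_sums_calc (bricks : List Int) (out : List (Int × List Int)) : Prop := out = min_len_sums_calc_alt bricks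
instance (bricks : List Int) (out : List (Int × List Int)) : Decidable (Spec_min_len_sums_calc bricks out) := by unfold Spec_min_len_sums_calc; infer_instance

-- ===== CLAIM (what is proved, stated in full; the proofs are below) =====
def Claim_equal_min_len_sums_calc : Prop := ∀ (bricks : List Int), Dom_min_len_sums_calc bricks → Spec_min_len_sums_calc bricks (min_len_sums_calc bricks)

-- ===== LEMMAS AND PROOFS =====

-- pvRepr nodes p v: following parent pointers from p through the arena spells out v,
-- with strictly decreasing node ids.
inductive pvRepr : List (Int × Option Nat) → Option Nat → List Int → Prop
  | nil (nodes : List (Int × Option Nat)) : pvRepr nodes none []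
  | cons (nodes : List (Int × Option Nat)) (k : Nat) (b : Int) (q : Option Nat) (v : List Int)
      (hget : nodes[k]? = some (b, q)) (hlt : ∀ j, q = some j → j < k)
      (hrec : pvRepr nodes q v) : pvRepr nodes (some k) (b :: v)

-- the correspondence between one A-dict entry and one B-dict entry
def pvR (nodes : List (Int × Option Nat)) (a : Int × List Int)
    (bb : Int × (Int × Option Nat)) : Prop :=
  bb.1 = a.1 ∧ bb.2.1 = (a.2.length : Int) ∧ pvRepr nodes bb.2.2 a.2

-- the joint invariant: A's set equals A's dict keys (which stay nodup), and A's and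
-- B's dict items are pointwise related through B's arena
def pvInv (stA : PySem.Set Int × PySem.Dict Int (List Int))
    (stB : List (Int × Option Nat) × PySem.Dict Int (Int × Option Nat)) : Prop :=
  (stA.1 : List Int) = stA.2.keys ∧ stA.2.keys.Nodup ∧
    List.Forall₂ (pvR stB.1) stA.2.items stB.2.items

theorem pvRepr_append (nodes L : List (Int × Option Nat)) (p : Option Nat) (v : List Int)
    (h : pvRepr nodes p v) : pvRepr (nodes ++ L) p v := by
  induction h with
  | nil => exact pvRepr.nil _
  | cons k b q v hget hlt hrec ih =>
    refine pvRepr.cons _ k b q v ?_ hlt ih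
    rw [List.getElem?_append_left (List.getElem?_eq_some_iff.mp hget).1]
    exact hget

theorem pvRepr_lt (nodes : List (Int × Option Nat)) (k : Nat) (v : List Int)
    (h : pvRepr nodes (some k) v) : k < nodes.length := by
  cases h with
  | cons _ b q v hget => exact (List.getElem?_eq_some_iff.mp hget).1

theorem minB_rebuild_correct (nodes : List (Int × Option Nat)) (p : Option Nat) (v : List Int)
    (h : pvRepr nodes p v) : ∀ f, (∀ k, p = some k → k < f) → minB_rebuild nodes f p = v := by
  induction h with
  | nil => intro f _; cases f <;> rfl
  | cons k b q v hget hlt hrec ih =>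
    intro f hf
    have hk := hf k rfl
    obtain ⟨f', rfl⟩ : ∃ f', f = f' + 1 := ⟨f - 1, by omega⟩
    show (match nodes[k]? with
      | none => []
      | some (b, q) => b :: minB_rebuild nodes f' q) = b :: v
    rw [hget]
    exact congrArg (b :: ·) (ih f' (fun j hj => by have := hlt j hj; omega))

theorem pvR_mono (nodes L : List (Int × Option Nat)) (a : Int × List Int)
    (bb : Int × (Int × Option Nat)) (h : pvR nodes a bb) : pvR (nodes ++ L) a bb :=
  ⟨h.1, h.2.1, pvRepr_append _ _ _ _ h.2.2⟩

theorem forall2_mono {nodes L : List (Int × Option Nat)}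
    {xs : List (Int × List Int)} {ys : List (Int × (Int × Option Nat))}
    (h : List.Forall₂ (pvR nodes) xs ys) : List.Forall₂ (pvR (nodes ++ L)) xs ys := by
  induction h with
  | nil => exact List.Forall₂.nil
  | cons hr _ ih => exact List.Forall₂.cons (pvR_mono _ _ _ _ hr) ih

theorem forall2_fst {nodes : List (Int × Option Nat)}
    {xs : List (Int × List Int)} {ys : List (Int × (Int × Option Nat))}
    (h : List.Forall₂ (pvR nodes) xs ys) :
    ys.map (fun p => p.1) = xs.map (fun p => p.1) := by
  induction h with
  | nil => rfl
  | cons hr _ ih => simpa [hr.1] using ih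

theorem forall2_append {nodes : List (Int × Option Nat)}
    {xs xs' : List (Int × List Int)} {ys ys' : List (Int × (Int × Option Nat))}
    (h : List.Forall₂ (pvR nodes) xs ys) (h' : List.Forall₂ (pvR nodes) xs' ys') :
    List.Forall₂ (pvR nodes) (xs ++ xs') (ys ++ ys') := by
  induction h with
  | nil => exact h'
  | cons hr _ ih => exact List.Forall₂.cons hr ih

theorem forall2_keys {nodes : List (Int × Option Nat)}
    {dA : PySem.Dict Int (List Int)} {dB : PySem.Dict Int (Int × Option Nat)}
    (h : List.Forall₂ (pvR nodes) dA.items dB.items) : dB.keys = dA.keys :=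
  forall2_fst h

theorem forall2_find? {nodes : List (Int × Option Nat)}
    {xs : List (Int × List Int)} {ys : List (Int × (Int × Option Nat))}
    (h : List.Forall₂ (pvR nodes) xs ys) (k : Int) :
    (xs.find? (fun p => p.1 == k) = none ∧ ys.find? (fun p => p.1 == k) = none) ∨
    (∃ a bb, xs.find? (fun p => p.1 == k) = some a ∧ ys.find? (fun p => p.1 == k) = some bb ∧
      pvR nodes a bb) := by
  induction h with
  | nil => exact Or.inl ⟨rfl, rfl⟩
  | cons hr ht ih =>
    rename_i a bb xs ys
    by_cases hk : a.1 = k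
    · exact Or.inr ⟨a, bb, by simp [hk], by simp [hr.1, hk], hr⟩
    · have hka : (a.1 == k) = false := by simp [hk]
      have hkb : (bb.1 == k) = false := by simp [hr.1, hk]
      simpa [List.find?_cons, hka, hkb] using ih

theorem get?_corr {nodes : List (Int × Option Nat)}
    {dA : PySem.Dict Int (List Int)} {dB : PySem.Dict Int (Int × Option Nat)}
    (hF : List.Forall₂ (pvR nodes) dA.items dB.items) (k : Int) :
    (dA.get? k = none ∧ dB.get? k = none) ∨
    (∃ v nd, dA.get? k = some v ∧ dB.get? k = some (((v.length : Int)), nd) ∧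
      pvRepr nodes nd v) := by
  rcases forall2_find? hF k with ⟨h1, h2⟩ | ⟨a, bb, h1, h2, hr⟩
  · exact Or.inl ⟨by simp [PySem.Dict.get?, h1], by simp [PySem.Dict.get?, h2]⟩
  · refine Or.inr ⟨a.2, bb.2.2, by simp [PySem.Dict.get?, h1], ?_, hr.2.2⟩
    simp [PySem.Dict.get?, h2, ← hr.2.1]

theorem getD_corr {nodes : List (Int × Option Nat)}
    {dA : PySem.Dict Int (List Int)} {dB : PySem.Dict Int (Int × Option Nat)}
    (hF : List.Forall₂ (pvR nodes) dA.items dB.items) (k : Int) :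
    (dB.getD k ((0 : Int), (none : Option Nat))).1 = ((dA.getD k []).length : Int) ∧
    pvRepr nodes (dB.getD k ((0 : Int), (none : Option Nat))).2 (dA.getD k []) := by
  rcases get?_corr hF k with ⟨h1, h2⟩ | ⟨v, nd, h1, h2, hr⟩
  · rw [PySem.Dict.getD_eq_get?_getD, PySem.Dict.getD_eq_get?_getD, h1, h2]
    exact ⟨rfl, pvRepr.nil _⟩
  · rw [PySem.Dict.getD_eq_get?_getD, PySem.Dict.getD_eq_get?_getD, h1, h2]
    exact ⟨rfl, hr⟩

theorem forall2_map_rel {α β α' β' : Type} {R : α → β → Prop} {R' : α' → β' → Prop}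
    {xs : List α} {ys : List β} (h : List.Forall₂ R xs ys)
    (f : α → α') (g : β → β') (hfg : ∀ a b, R a b → R' (f a) (g b)) :
    List.Forall₂ R' (xs.map f) (ys.map g) := by
  induction h with
  | nil => exact List.Forall₂.nil
  | cons hr _ ih => exact List.Forall₂.cons (hfg _ _ hr) ih

theorem insert_self_of_get? (d : PySem.Dict Int (List Int)) (k : Int) (v : List Int)
    (hnd : d.keys.Nodup) (h : d.get? k = some v) : d.insert k v = d := by
  apply PySem.Dict.ext
  rw [PySem.Dict.items_insert_of_contains _ _ (by rw [PySem.Dict.contains_eq_isSome_get?, h]; rfl)]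
  have hmem : (k, v) ∈ d.items := PySem.Dict.mem_items_of_get?_eq_some d h
  conv_rhs => rw [← List.map_id d.items]
  apply List.map_congr_left
  intro p hp
  by_cases hk : p.1 = k
  · have hpv : p = (k, v) :=
      List.inj_on_of_nodup_map (f := Prod.fst) (l := d.items) hnd hp hmem (by simp [hk])
    simp [hpv]
  · simp [hk]

theorem insert_corr {nodes : List (Int × Option Nat)}
    {dA : PySem.Dict Int (List Int)} {dB : PySem.Dict Int (Int × Option Nat)}
    (hF : List.Forall₂ (pvR nodes) dA.items dB.items)
    (t : Int) (v : List Int) (l : Int) (nd : Option Nat)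
    (hv : pvR nodes (t, v) (t, (l, nd))) :
    List.Forall₂ (pvR nodes) (dA.insert t v).items (dB.insert t (l, nd)).items := by
  have hkeys : dB.keys = dA.keys := forall2_keys hF
  have hcont : dB.contains t = dA.contains t := by
    rw [PySem.Dict.contains_eq_decide_mem_keys, PySem.Dict.contains_eq_decide_mem_keys, hkeys]
  by_cases hc : dA.contains t = true
  · rw [PySem.Dict.items_insert_of_contains _ _ hc,
      PySem.Dict.items_insert_of_contains _ _ (hcont.trans hc)]
    refine forall2_map_rel hF _ _ ?_
    intro a bb hr
    by_cases hk : a.1 = t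
    · have hkb : (bb.1 == t) = true := by simp [hr.1, hk]
      simp only [hk, beq_self_eq_true, if_pos, hkb]
      exact hv
    · have hkb : (bb.1 == t) = false := by simp [hr.1, hk]
      have hka : (a.1 == t) = false := by simp [hk]
      simp only [hka, hkb, Bool.false_eq_true, if_false]
      exact hr
  · have hc' : dA.contains t = false := by revert hc; cases dA.contains t <;> simp
    rw [PySem.Dict.items_insert_of_not_contains _ _ hc',
      PySem.Dict.items_insert_of_not_contains _ _ (hcont.trans hc')]
    exact forall2_append hF (List.Forall₂.cons hv List.Forall₂.nil)

theorem step_corr (b x : Int) (dA : PySem.Dict Int (List Int))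
    (nodes : List (Int × Option Nat)) (dB : PySem.Dict Int (Int × Option Nat))
    (hnd : dA.keys.Nodup) (hF : List.Forall₂ (pvR nodes) dA.items dB.items) :
    pvInv (minA_step b (dA.keys, dA) x) (minB_step b (nodes, dB) x) := by
  obtain ⟨hlen, hrep⟩ := getD_corr hF x
  unfold minA_step minB_step pvInv
  have hcomm : x + b = b + x := by ring
  rw [hcomm]
  have hnewR : ∀ (nodes' : List (Int × Option Nat)), nodes' = nodes ++
        [(b, (dB.getD x ((0 : Int), (none : Option Nat))).2)] →
      pvR nodes' (b + x, b :: dA.getD x [])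
        (b + x, ((dB.getD x ((0 : Int), (none : Option Nat))).1 + 1, some (nodes'.length - 1))) := by
    intro nodes' hn
    refine ⟨rfl, ?_, ?_⟩
    · simp only [hlen, List.length_cons]
      push_cast
      ring
    · have hidx : nodes'.length - 1 = nodes.length := by simp [hn]
      rw [hidx, hn]
      refine pvRepr.cons _ nodes.length b _ _ ?_ ?_ (pvRepr_append _ _ _ _ hrep)
      · exact List.getElem?_concat_length
      · intro j hj
        exact pvRepr_lt nodes j _ (hj ▸ hrep)
  rcases get?_corr hF (b + x) with ⟨hgA, hgB⟩ | ⟨old, ndo, hgA, hgB, hro⟩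
  · -- new key: both insert
    have hc : dA.contains (b + x) = false := (PySem.Dict.get?_eq_none_iff_contains dA _).1 hgA
    have hmem : (b + x) ∉ dA.keys := by
      have := PySem.Dict.contains_eq_decide_mem_keys dA (b + x)
      rw [hc] at this; simpa using this.symm
    simp only [hgA, hgB, if_pos]
    refine ⟨?_, PySem.Dict.nodup_keys_insert _ _ _ hnd, ?_⟩
    · rw [PySem.Dict.keys_insert_of_not_contains _ _ hc]
      simp [PySem.Set.add, PySem.Set.contains, hmem]
    · exact insert_corr (forall2_mono hF) _ _ _ _ (hnewR _ rfl)
  · -- existing key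
    have hc : dA.contains (b + x) = true := by
      rw [PySem.Dict.contains_eq_isSome_get?, hgA]; rfl
    have hmem : (b + x) ∈ dA.keys := by
      have := PySem.Dict.contains_eq_decide_mem_keys dA (b + x)
      rw [hc] at this; simpa using this.symm
    have hsetkeys : ((PySem.Set.add (dA.keys : PySem.Set Int) (b + x)) : List Int) = dA.keys := by
      simp [PySem.Set.add, PySem.Set.contains, hmem]
    simp only [hgA, hgB]
    by_cases hup : (dB.getD x ((0 : Int), (none : Option Nat))).1 + 1 < (old.length : Int)
    · -- strict improvement: both replace
      have hA : ¬ (old.length ≤ (b :: dA.getD x []).length) := by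
        simp only [List.length_cons]
        rw [hlen] at hup
        omega
      rw [if_neg hA, if_pos (by simpa using hup)]
      refine ⟨by rw [PySem.Dict.keys_insert_of_contains _ _ hc]; exact hsetkeys,
        PySem.Dict.nodup_keys_insert _ _ _ hnd, ?_⟩
      exact insert_corr (forall2_mono hF) _ _ _ _ (hnewR _ rfl)
    · -- no improvement: A rewrites the same value, B does nothing
      have hA : old.length ≤ (b :: dA.getD x []).length := by
        simp only [List.length_cons]
        rw [hlen] at hup
        omega
      rw [if_pos hA, if_neg (by simpa using hup)]
      rw [insert_self_of_get? dA _ _ hnd hgA]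
      exact ⟨hsetkeys, hnd, hF⟩

theorem inner_corr (b : Int) (snap : List Int) :
    ∀ (dA : PySem.Dict Int (List Int)) (nodes : List (Int × Option Nat))
      (dB : PySem.Dict Int (Int × Option Nat)),
      dA.keys.Nodup → List.Forall₂ (pvR nodes) dA.items dB.items →
      pvInv (snap.foldl (minA_step b) (dA.keys, dA)) (snap.foldl (minB_step b) (nodes, dB)) := by
  induction snap with
  | nil => exact fun dA nodes dB hnd hF => ⟨rfl, hnd, hF⟩
  | cons x xs ih =>
    intro dA nodes dB hnd hF
    obtain ⟨h1, h2, h3⟩ := step_corr b x dA nodes dB hnd hF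
    simp only [List.foldl_cons]
    have hstA : minA_step b (dA.keys, dA) x =
        ((minA_step b (dA.keys, dA) x).2.keys, (minA_step b (dA.keys, dA) x).2) := by
      rw [← h1]
    have hstB : minB_step b (nodes, dB) x =
        ((minB_step b (nodes, dB) x).1, (minB_step b (nodes, dB) x).2) := rfl
    rw [hstA, hstB]
    exact ih _ _ _ h2 h3

theorem outer_corr (bricks : List Int) :
    ∀ (dA : PySem.Dict Int (List Int)) (nodes : List (Int × Option Nat))
      (dB : PySem.Dict Int (Int × Option Nat)),
      dA.keys.Nodup → List.Forall₂ (pvR nodes) dA.items dB.items →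
      pvInv (bricks.foldl minA_outer (dA.keys, dA)) (bricks.foldl minB_outer (nodes, dB)) := by
  induction bricks with
  | nil => exact fun dA nodes dB hnd hF => ⟨rfl, hnd, hF⟩
  | cons b bs ih =>
    intro dA nodes dB hnd hF
    simp only [List.foldl_cons]
    have houter : minA_outer (dA.keys, dA) b = (PySem.List.sorted dA.keys (fun x => x) true).foldl
        (minA_step b) (dA.keys, dA) := rfl
    have hBouter : minB_outer (nodes, dB) b = (PySem.List.sorted dA.keys (fun x => x) true).foldl
        (minB_step b) (nodes, dB) := by
      unfold minB_outer
      rw [forall2_keys hF]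
    obtain ⟨h1, h2, h3⟩ := inner_corr b (PySem.List.sorted dA.keys (fun x => x) true) dA nodes dB hnd hF
    rw [houter, hBouter]
    have hstA : (PySem.List.sorted dA.keys (fun x => x) true).foldl (minA_step b) (dA.keys, dA) =
        (((PySem.List.sorted dA.keys (fun x => x) true).foldl (minA_step b) (dA.keys, dA)).2.keys,
         ((PySem.List.sorted dA.keys (fun x => x) true).foldl (minA_step b) (dA.keys, dA)).2) := by
      rw [← h1]
    rw [hstA]
    exact ih _ _ _ h2 h3

theorem forall2_final (nodes : List (Int × Option Nat))
    {xs : List (Int × List Int)} {ys : List (Int × (Int × Option Nat))}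
    (h : List.Forall₂ (pvR nodes) xs ys) :
    ys.map (fun q => (q.1, minB_rebuild nodes nodes.length q.2.2)) = xs := by
  induction h with
  | nil => rfl
  | cons hr _ ih =>
    rename_i a bb xs ys
    simp only [List.map_cons, ih]
    congr 1
    refine Prod.ext hr.1 ?_
    exact minB_rebuild_correct nodes _ _ hr.2.2 nodes.length
      (fun k hk => pvRepr_lt nodes k _ (hk ▸ hr.2.2))

-- ===== VERDICT (by name: the statement is the Claim_ definition above) =====
theorem min_len_sums_calc_spec : Claim_equal_min_len_sums_calc := by
  intro bricks _
  unfold Spec_min_len_sums_calc min_len_sums_calc min_len_sums_calc_alt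
  have hkeys0 : (PySem.Set.ofList [(0 : Int)] : PySem.Set Int) =
      (PySem.Dict.ofList [((0 : Int), ([] : List Int))]).keys := by decide
  rw [hkeys0]
  have hF0 : List.Forall₂ (pvR ([] : List (Int × Option Nat)))
      (PySem.Dict.ofList [((0 : Int), ([] : List Int))]).items
      (PySem.Dict.ofList [((0 : Int), ((0 : Int), (none : Option Nat)))]).items :=
    List.Forall₂.cons ⟨rfl, rfl, pvRepr.nil _⟩ List.Forall₂.nil
  obtain ⟨-, -, h3⟩ := outer_corr bricks (PySem.Dict.ofList [((0 : Int), ([] : List Int))])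
      ([] : List (Int × Option Nat))
      (PySem.Dict.ofList [((0 : Int), ((0 : Int), (none : Option Nat)))]) (by decide) hF0
  exact (forall2_final _ h3).symm
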